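-- pv_equiv track=rewrite | github.com/wuchen0901/algorithm | python/Pick One Shelf Fully, Take Half From Others.py | max_taken_floor_dp
-- ===== SOURCE A (Python) =====
-- from typing import List
--
-- def max_taken_floor_dp(books: List[int]) -> int:
--     """
--     Two-state DP for floor division variant.
--
--     half = total if we have NOT yet used the 'full' option (sum of x//2 so far)
--     full = total if we HAVE already used the 'full' option somewhere (best so far)
--
--     Transition:
--       new_half = half + x//2
--       new_full = max(full + x//2,   # already used before; half now
--                      half + x)      # use full here
--     """
--     if not books:
--         return 0
--
--     half = 0
--     full = -10**30  # effectively -inf for ints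
--
--     for x in books:
--         new_half = half + x // 2
--         new_full = max(full + x // 2, half + x)
--         half, full = new_half, new_full
--
--     return full
-- ===== SOURCE B (Python) =====
-- from typing import List
--
-- def max_taken_floor_dp(books: List[int]) -> int:
--     # Closed decomposition: take x//2 from every shelf, plus the best
--     # upgrade x - x//2 (= ceil(x/2)) for the one shelf taken fully.
--     if not books:
--         return 0
--     return sum(x // 2 for x in books) + max(x - x // 2 for x in books)
-- ===== Notes on version B (the rewrite author's own statement) =====
-- stated objective: simpler
-- what changed: Replaces the coupled two-state DP with two independent one-pass aggregates: the sum of x//2 over all shelves plus the maximum upgrade x - x//2, added at the end.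
import Mathlib
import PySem

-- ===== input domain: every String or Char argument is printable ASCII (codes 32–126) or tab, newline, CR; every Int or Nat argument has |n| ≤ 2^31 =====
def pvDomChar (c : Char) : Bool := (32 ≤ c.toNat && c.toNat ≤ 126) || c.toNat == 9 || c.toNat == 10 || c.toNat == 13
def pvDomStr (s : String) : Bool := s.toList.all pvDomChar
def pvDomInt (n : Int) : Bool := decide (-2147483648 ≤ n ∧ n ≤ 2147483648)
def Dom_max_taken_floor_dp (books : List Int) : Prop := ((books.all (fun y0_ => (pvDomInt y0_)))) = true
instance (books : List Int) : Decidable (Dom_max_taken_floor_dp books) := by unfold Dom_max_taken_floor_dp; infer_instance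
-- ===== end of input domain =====

-- B replaces A's coupled two-state DP by two independent one-pass aggregates (sum of x//2, max of x - x//2) added at the end; objective: simpler.

-- ===== PORT A =====
-- literal port: the loop carries (half, full), full starts at the -10^30 sentinel
def max_taken_floor_dp (books : List Int) : Int :=
  if books = [] then 0
  else
    (books.foldl
      (fun (st : Int × Int) x =>
        (st.1 + PySem.Int.floordiv x 2, max (st.2 + PySem.Int.floordiv x 2) (st.1 + x)))
      (0, -10^30)).2

-- ===== PORT B =====
-- sum(x//2 for x in books) + max(x - x//2 for x in books), 0 on the empty list
def max_taken_floor_dp_alt (books : List Int) : Int :=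
  match books with
  | [] => 0
  | b :: bs =>
    (b :: bs).foldl (fun a x => a + PySem.Int.floordiv x 2) 0
      + bs.foldl (fun a x => max a (x - PySem.Int.floordiv x 2)) (b - PySem.Int.floordiv b 2)

-- ===== PRECONDITION & SPEC =====
def Spec_max_taken_floor_dp (books : List Int) (out : Int) : Prop := out = max_taken_floor_dp_alt books
instance (books : List Int) (out : Int) : Decidable (Spec_max_taken_floor_dp books out) := by unfold Spec_max_taken_floor_dp; infer_instance

-- ===== CLAIM (what is proved, stated in full; the proofs are below) =====
def Claim_equal_max_taken_floor_dp : Prop := ∀ (books : List Int), Dom_max_taken_floor_dp books → Spec_max_taken_floor_dp books (max_taken_floor_dp books)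

-- ===== LEMMAS AND PROOFS =====

-- sum of x//2 over a list
def pvS (l : List Int) : Int :=
  match l with
  | [] => 0
  | x :: xs => PySem.Int.floordiv x 2 + pvS xs

-- max of x - x//2 over a nonempty list (meaningless 0 on [])
def pvM (l : List Int) : Int :=
  match l with
  | [] => 0
  | x :: xs => if xs = [] then x - PySem.Int.floordiv x 2
               else max (x - PySem.Int.floordiv x 2) (pvM xs)

-- best value of A's "full" path started from half = h, over a nonempty list
def pvC (l : List Int) : Int :=
  match l with
  | [] => 0
  | x :: xs => if xs = [] then x else max (x + pvS xs) (PySem.Int.floordiv x 2 + pvC xs)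

lemma pvS_foldl (l : List Int) (a : Int) :
    l.foldl (fun a x => a + PySem.Int.floordiv x 2) a = a + pvS l := by
  induction l generalizing a with
  | nil => simp [pvS]
  | cons x xs ih =>
    rw [List.foldl_cons, ih]
    simp only [pvS]
    omega

lemma pvM_foldl (l : List Int) (c : Int) :
    l.foldl (fun a x => max a (x - PySem.Int.floordiv x 2)) c = if l = [] then c else max c (pvM l) := by
  induction l generalizing c with
  | nil => simp
  | cons x xs ih =>
    rw [List.foldl_cons, ih]
    simp only [pvM, List.cons_ne_nil, ite_false]
    by_cases h : xs = [] <;> simp only [h, ite_false, if_pos] <;> omega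

lemma pvA_loop (l : List Int) (h f : Int) (hne : l ≠ []) :
    (l.foldl
      (fun (st : Int × Int) x =>
        (st.1 + PySem.Int.floordiv x 2, max (st.2 + PySem.Int.floordiv x 2) (st.1 + x)))
      (h, f)).2 = max (f + pvS l) (h + pvC l) := by
  induction l generalizing h f with
  | nil => exact absurd rfl hne
  | cons x xs ih =>
    by_cases hxs : xs = []
    · subst hxs; simp only [List.foldl]; simp [pvS, pvC]
    · rw [List.foldl_cons, ih _ _ hxs]
      simp only [pvC, pvS, if_neg hxs]
      omega

lemma pvC_eq (l : List Int) (hne : l ≠ []) : pvC l = pvS l + pvM l := by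
  induction l with
  | nil => exact absurd rfl hne
  | cons x xs ih =>
    by_cases hxs : xs = []
    · subst hxs
      simp only [pvC, pvS, pvM, ite_true]
      omega
    · simp only [pvC, pvS, pvM, if_neg hxs, ih hxs]
      omega

lemma pvCeil_ge (x : Int) (hx : -2147483648 ≤ x) : -2147483648 ≤ x - PySem.Int.floordiv x 2 := by
  have h2 : (0:Int) < 2 := by norm_num
  rw [PySem.Int.floordiv_eq_ediv_of_pos h2]
  omega

lemma pvM_ge (l : List Int) (hne : l ≠ []) (hb : ∀ x ∈ l, -2147483648 ≤ x) :
    -2147483648 ≤ pvM l := by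
  induction l with
  | nil => exact absurd rfl hne
  | cons x xs ih =>
    by_cases hxs : xs = []
    · subst hxs
      simpa [pvM] using pvCeil_ge x (hb x (by simp))
    · simp only [pvM, if_neg hxs]
      exact le_max_of_le_right (ih hxs (fun y hy => hb y (List.mem_cons_of_mem _ hy)))

-- ===== VERDICT (by name: the statement is the Claim_ definition above) =====
theorem max_taken_floor_dp_spec : Claim_equal_max_taken_floor_dp := by
  intro books hdom
  unfold Spec_max_taken_floor_dp
  match books with
  | [] => rfl
  | b :: bs =>
    have hne : (b :: bs) ≠ [] := by simp
    have hb : ∀ x ∈ b :: bs, -2147483648 ≤ x := by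
      intro x hx
      have := List.all_eq_true.mp hdom x hx
      simp [pvDomInt] at this
      exact this.1
    have hM : -2147483648 ≤ pvM (b :: bs) := pvM_ge _ hne hb
    simp only [max_taken_floor_dp, max_taken_floor_dp_alt, if_neg hne]
    rw [pvA_loop _ _ _ hne, pvC_eq _ hne, pvS_foldl, pvM_foldl]
    have hMdef : (if bs = [] then b - PySem.Int.floordiv b 2
        else max (b - PySem.Int.floordiv b 2) (pvM bs)) = pvM (b :: bs) := by
      simp only [pvM]
    rw [hMdef]
    omega
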